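-- pv_equiv track=rewrite | github.com/kunalj101/Innoplexus_sentiment_analysis_top_solutions | Rank_1_exmortal/src/final_code.py | get_closest_180
-- ===== SOURCE A (Python) =====
-- def get_closest_180(tokens, label, sub_sequence_length):
--     def get_all_locations(tokens, label):
--         i = 0
--         result = []
--         while i < len(tokens):
--             if tokens[i:i+len(label)] == label:
--                 result.append((i, i+len(label)))
--                 i += len(label)
--             else:
--                 i += 1
--         return result
--
--     def get_middle_most_180(postion, total_length):
--         if isinstance(postion, list):
--             start_position = (postion[0][0] + postion[1][0]) // 2
--             end_position = (postion[0][1] + postion[1][1]) // 2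
--         else:
--             start_position = postion[0]
--             end_position = postion[1]
--
--         final_start_position = (start_position + end_position)//2 - sub_sequence_length//2
--         final_end_position = (start_position + end_position)//2 + sub_sequence_length//2
--
--         if final_start_position < 0:
--             final_start_position = 0
--             final_end_position = sub_sequence_length
--         elif final_end_position > total_length:
--             final_start_position = total_length - sub_sequence_length
--             final_end_position = total_length
--
--         return final_start_position, final_end_position
--
--     if len(tokens) <= sub_sequence_length:
--         return tokens
--
--     locations = get_all_locations(tokens=tokens, label=label)
--     if len(locations) != 0 and len(locations) % 2 == 0:
--         start, end = get_middle_most_180(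
--             postion=[locations[(len(locations) - 1) // 2], locations[len(locations) // 2]],
--             total_length=len(tokens)
--         )
--     elif len(locations) != 0:
--         start, end = get_middle_most_180(postion=locations[len(locations) // 2], total_length=len(tokens))
--     else:
--         start, end = 0, sub_sequence_length
--
--     result = tokens[start:end]
--     return result
-- ===== SOURCE B (Python) =====
-- def _fall(label, fail, ch, k):
--     # slide back along borders until ch extends the current prefix (or k == 0)
--     while k > 0 and ch != label[k]:
--         k = fail[k - 1]
--     return k
--
--
-- def get_closest_180(tokens, label, sub_sequence_length):
--     n = len(tokens)
--     if n <= sub_sequence_length: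
--         return tokens
--     L = len(label)
--
--     # KMP failure table: fail[j-1] = length of the longest proper border of label[:j]
--     fail = [0]
--     k = 0
--     for j in range(1, L):
--         k = _fall(label, fail, label[j], k)
--         if label[j] == label[k]:
--             k += 1
--         fail.append(k)
--
--     # one left-to-right automaton pass; reset on a full match => non-overlapping
--     starts = []
--     j = 0
--     for i, tok in enumerate(tokens):
--         j = _fall(label, fail, tok, j)
--         if tok == label[j]:
--             j += 1
--         if j == L:
--             starts.append(i + 1 - L)
--             j = 0
--
--     m = len(starts)
--     if m == 0:
--         start, end = 0, sub_sequence_length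
--     else:
--         # centre of the middle occurrence (average of the two middle ones when even)
--         mid = starts[m // 2] if m % 2 else (starts[(m - 1) // 2] + starts[m // 2]) // 2
--         c = mid + L // 2
--         start = c - sub_sequence_length // 2
--         end = c + sub_sequence_length // 2
--         if start < 0:
--             start, end = 0, sub_sequence_length
--         elif end > n:
--             start, end = n - sub_sequence_length, n
--     return tokens[start:end]
-- ===== Notes on version B (the rewrite author's own statement) =====
-- stated objective: faster
-- what changed: B replaces A's skip-walk that re-slices tokens[i:i+len(label)] at every position by a KMP automaton: an incrementally built failure table over the label plus one left-to-right pass over tokens with no re-slicing (resetting the automaton on a full match yields the same non-overlapping occurrences), and it collapses A's two-stage midpoint averaging into a closed-form centre mid + len(label)//2.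
import Mathlib
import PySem

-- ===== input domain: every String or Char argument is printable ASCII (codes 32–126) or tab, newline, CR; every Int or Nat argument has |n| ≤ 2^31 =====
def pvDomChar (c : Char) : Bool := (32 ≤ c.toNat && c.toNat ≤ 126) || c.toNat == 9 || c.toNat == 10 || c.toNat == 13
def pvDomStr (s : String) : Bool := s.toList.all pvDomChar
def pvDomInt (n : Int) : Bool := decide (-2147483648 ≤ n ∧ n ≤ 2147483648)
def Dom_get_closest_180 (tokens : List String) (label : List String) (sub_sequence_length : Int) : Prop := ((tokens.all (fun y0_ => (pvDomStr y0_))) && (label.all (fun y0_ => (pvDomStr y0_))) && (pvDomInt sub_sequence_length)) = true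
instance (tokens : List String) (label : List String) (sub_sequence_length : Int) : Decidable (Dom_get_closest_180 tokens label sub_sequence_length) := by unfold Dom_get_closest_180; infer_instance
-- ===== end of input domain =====

-- B replaces A's repeated-slicing skip-walk by a KMP automaton: a failure table over
-- the label and ONE left-to-right pass over tokens with no re-slicing (reset on a full
-- match gives the same non-overlapping occurrences); the median window is a closed form.

-- ===== PORT A =====
-- the inner while loop of get_all_locations; fuel only makes the recursion total
-- (Python terminates whenever label ≠ [], which Pre_ guarantees; fuel n+1 suffices there)
def pvScanA (tokens label : List String) : Nat → Nat → List (Int × Int)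
  | 0, _ => []
  | fuel+1, i =>
    if i < tokens.length then
      if PySem.List.slice tokens (some (i : Int)) (some ((i : Int) + (label.length : Int))) = label then
        ((i : Int), (i : Int) + (label.length : Int)) :: pvScanA tokens label fuel (i + label.length)
      else
        pvScanA tokens label fuel (i + 1)
    else []

-- get_middle_most_180 after start_position/end_position have been selected
def pvMiddleA (sub_sequence_length start_position end_position total_length : Int) : Int × Int :=
  let final_start_position := PySem.Int.floordiv (start_position + end_position) 2 - PySem.Int.floordiv sub_sequence_length 2
  let final_end_position := PySem.Int.floordiv (start_position + end_position) 2 + PySem.Int.floordiv sub_sequence_length 2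
  if final_start_position < 0 then (0, sub_sequence_length)
  else if final_end_position > total_length then (total_length - sub_sequence_length, total_length)
  else (final_start_position, final_end_position)

def get_closest_180 (tokens : List String) (label : List String) (sub_sequence_length : Int) : List String :=
  if (tokens.length : Int) ≤ sub_sequence_length then tokens
  else
    let locations := pvScanA tokens label (tokens.length + 1) 0
    let se :=
      if locations.length ≠ 0 ∧ locations.length % 2 = 0 then
        -- Python indices (len-1)//2 and len//2 are nonnegative and in range: Nat division is exact here
        let p1 := locations.getD ((locations.length - 1) / 2) (0, 0)
        let p2 := locations.getD (locations.length / 2) (0, 0)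
        pvMiddleA sub_sequence_length
          (PySem.Int.floordiv (p1.1 + p2.1) 2) (PySem.Int.floordiv (p1.2 + p2.2) 2)
          (tokens.length : Int)
      else if locations.length ≠ 0 then
        let p := locations.getD (locations.length / 2) (0, 0)
        pvMiddleA sub_sequence_length p.1 p.2 (tokens.length : Int)
      else ((0 : Int), sub_sequence_length)
    PySem.List.slice tokens (some se.1) (some se.2)

-- ===== PORT B =====
-- _fall: the shared while loop (slide back along borders); fuel k suffices because
-- each step strictly decreases k (fail[k-1] < k), proved in the lemmas below
def pvFall (label : List String) (fail : List Nat) (tok : String) : Nat → Nat → Nat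
  | 0, j => j
  | f+1, j => if 0 < j ∧ tok ≠ label.getD j "" then pvFall label fail tok f (fail.getD (j - 1) 0) else j

-- the failure-table construction loop (for j in range(1, L), appending entries)
def pvBuildGo (label : List String) : Nat → Nat → List Nat → Nat → List Nat
  | 0, _, fail, _ => fail
  | c+1, j, fail, k =>
    let k1 := pvFall label fail (label.getD j "") k k
    let k2 := if label.getD j "" = label.getD k1 "" then k1 + 1 else k1
    pvBuildGo label c (j+1) (fail ++ [k2]) k2

-- fail[j-1] = length of the longest proper border of label[:j]
def pvFailTbl (label : List String) : List Nat :=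
  pvBuildGo label (label.length - 1) 1 [0] 0

-- the for-i,tok loop over enumerate(tokens), state (starts, j)
def pvKmpGo (label : List String) (fail : List Nat) : List String → Nat → Nat → List Int → List Int
  | [], _, _, acc => acc
  | tok :: rest, i, j, acc =>
    let j1 := pvFall label fail tok j j
    let j2 := if tok = label.getD j1 "" then j1 + 1 else j1
    if j2 = label.length then
      pvKmpGo label fail rest (i+1) 0 (acc ++ [(i : Int) + 1 - (label.length : Int)])
    else
      pvKmpGo label fail rest (i+1) j2 acc

def get_closest_180_alt (tokens : List String) (label : List String) (sub_sequence_length : Int) : List String :=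
  if (tokens.length : Int) ≤ sub_sequence_length then tokens
  else
    let n : Int := tokens.length
    let L : Int := label.length
    let fail := pvFailTbl label
    let starts := pvKmpGo label fail tokens 0 0 []
    let m := starts.length
    if m = 0 then PySem.List.slice tokens (some 0) (some sub_sequence_length)
    else
      let mid := if m % 2 = 1 then starts.getD (m / 2) 0
                 else PySem.Int.floordiv (starts.getD ((m - 1) / 2) 0 + starts.getD (m / 2) 0) 2
      let c := mid + PySem.Int.floordiv L 2
      let fs := c - PySem.Int.floordiv sub_sequence_length 2
      let fe := c + PySem.Int.floordiv sub_sequence_length 2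
      let se := if fs < 0 then ((0 : Int), sub_sequence_length)
                else if fe > n then (n - sub_sequence_length, n)
                else (fs, fe)
      PySem.List.slice tokens (some se.1) (some se.2)

-- ===== PRECONDITION & SPEC =====
-- Pre_ excludes only label = [] together with len(tokens) > sub_sequence_length,
-- on which A's while loop never advances and the Python diverges (no return value).
def Pre_get_closest_180 (tokens : List String) (label : List String) (sub_sequence_length : Int) : Prop :=
  (tokens.length : Int) ≤ sub_sequence_length ∨ label ≠ []
instance (tokens : List String) (label : List String) (sub_sequence_length : Int) : Decidable (Pre_get_closest_180 tokens label sub_sequence_length) := by unfold Pre_get_closest_180; infer_instance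

def pvWitness_get_closest_180 : List String × List String × Int := (["a", "b", "a"], ["a"], 1)

def Spec_get_closest_180 (tokens : List String) (label : List String) (sub_sequence_length : Int) (out : List String) : Prop := out = get_closest_180_alt tokens label sub_sequence_length
instance (tokens : List String) (label : List String) (sub_sequence_length : Int) (out : List String) : Decidable (Spec_get_closest_180 tokens label sub_sequence_length out) := by unfold Spec_get_closest_180; infer_instance

-- ===== CLAIM (what is proved, stated in full; the proofs are below) =====
def Claim_equal_get_closest_180 : Prop := ∀ (tokens : List String) (label : List String) (sub_sequence_length : Int), Dom_get_closest_180 tokens label sub_sequence_length → Pre_get_closest_180 tokens label sub_sequence_length → Spec_get_closest_180 tokens label sub_sequence_length (get_closest_180 tokens label sub_sequence_length)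

-- ===== LEMMAS AND PROOFS =====

-- proof-side: the list of non-overlapping match START positions A's scan selects
def pvSel (tokens label : List String) : Nat → Nat → List Nat
  | 0, _ => []
  | fuel+1, i =>
    if i < tokens.length then
      if (tokens.drop i).take label.length = label then
        i :: pvSel tokens label fuel (i + label.length)
      else
        pvSel tokens label fuel (i + 1)
    else []

theorem pvScanA_eq_map (tokens label : List String) (fuel i : Nat) :
    pvScanA tokens label fuel i
      = (pvSel tokens label fuel i).map (fun s : Nat => ((s : Int), (s : Int) + (label.length : Int))) := by
  induction fuel generalizing i with
  | zero => rfl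
  | succ f ih =>
    simp only [pvScanA, pvSel, PySem.List.slice_natCast_add]
    split_ifs <;> simp [ih]

theorem pvSel_of_ge (tokens label : List String) (fuel i : Nat) (h : tokens.length ≤ i) :
    pvSel tokens label fuel i = [] := by
  cases fuel <;> simp [pvSel, Nat.not_lt.mpr h]

theorem pvOcc_false (tokens label : List String) (s : Nat)
    (hL : 1 ≤ label.length) (h : tokens.length < s + label.length) :
    (tokens.drop s).take label.length ≠ label := by
  intro heq
  apply_fun List.length at heq
  simp at heq
  omega

theorem pvSel_nil (tokens label : List String) (fuel i : Nat)
    (hL : 1 ≤ label.length) (h : tokens.length + 1 - label.length ≤ i) :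
    pvSel tokens label fuel i = [] := by
  induction fuel generalizing i with
  | zero => rfl
  | succ f ih =>
    simp only [pvSel]
    split_ifs with h1 h2
    · exact absurd h2 (pvOcc_false tokens label i hL (by omega))
    · exact ih (i + 1) (by omega)
    · rfl

theorem pvSel_fuel (tokens label : List String) (hL : 1 ≤ label.length) :
    ∀ (f1 : Nat) (i : Nat) (f2 : Nat), tokens.length - i ≤ f1 → tokens.length - i ≤ f2 →
      pvSel tokens label f1 i = pvSel tokens label f2 i := by
  intro f1
  induction f1 with
  | zero =>
    intro i f2 h1 _
    rw [pvSel_of_ge tokens label f2 i (by omega)]; rfl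
  | succ f ih =>
    intro i f2 h1 h2
    by_cases hi : i < tokens.length
    · cases f2 with
      | zero => omega
      | succ g =>
        simp only [pvSel, if_pos hi]
        split_ifs with ho
        · rw [ih (i + label.length) g (by omega) (by omega)]
        · rw [ih (i + 1) g (by omega) (by omega)]
    · rw [pvSel_of_ge tokens label _ i (by omega), pvSel_of_ge tokens label _ i (by omega)]

theorem pvSel_cons (tokens label : List String) (fuel i : Nat) (hi : i < tokens.length)
    (ho : (tokens.drop i).take label.length = label) :
    pvSel tokens label (fuel + 1) i = i :: pvSel tokens label fuel (i + label.length) := by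
  simp [pvSel, hi, ho]

theorem pvSel_skip (tokens label : List String) (fuel i : Nat) (hi : i < tokens.length)
    (ho : ¬ (tokens.drop i).take label.length = label) :
    pvSel tokens label (fuel + 1) i = pvSel tokens label fuel (i + 1) := by
  simp [pvSel, hi, ho]

-- pvSel skips over any initial segment with no full match
theorem pvSel_congr (tokens label : List String) (hL : 1 ≤ label.length) :
    ∀ (d p q : Nat), p + d = q →
      (∀ t, p ≤ t → t < q → (tokens.drop t).take label.length ≠ label) →
      pvSel tokens label (tokens.length + 1) p = pvSel tokens label (tokens.length + 1) q := by
  intro d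
  induction d with
  | zero => intro p q h _; rw [Nat.add_zero] at h; rw [h]
  | succ d ih =>
    intro p q h hno
    by_cases hp : p < tokens.length
    · rw [pvSel_skip tokens label _ p hp (hno p le_rfl (by omega)),
        pvSel_fuel tokens label hL tokens.length (p+1) (tokens.length + 1) (by omega) (by omega)]
      exact ih (p+1) q (by omega) (fun t ht1 ht2 => hno t (by omega) ht2)
    · rw [pvSel_of_ge tokens label _ p (by omega), pvSel_of_ge tokens label _ q (by omega)]

-- ---- border lemmas and failure-table correctness ----
-- Bd j k: label[:k] is a border of label[:j]  (in the drop/take form the port's indices reduce to)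
def pvBd (label : List String) (j k : Nat) : Prop :=
  (label.drop (j - k)).take k = label.take k

theorem pvBd_zero (label : List String) (j : Nat) : pvBd label j 0 := by
  simp [pvBd]

theorem pvBd_trans (label : List String) (j k m : Nat)
    (h1 : pvBd label j k) (h2 : pvBd label k m) (hmk : m ≤ k) (hkj : k ≤ j) :
    pvBd label j m := by
  unfold pvBd at *
  have e1 : j - m = (j - k) + (k - m) := by omega
  rw [e1, ← List.drop_drop]
  have key : ((label.drop (j-k)).drop (k-m)).take m = ((label.drop (j-k)).take k).drop (k-m) := by
    rw [List.drop_take]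
    have : k - (k - m) = m := by omega
    rw [this]
  rw [key, h1, List.drop_take]
  have : k - (k - m) = m := by omega
  rw [this, h2]

theorem pvBd_restrict (label : List String) (j k m : Nat)
    (h1 : pvBd label j k) (h2 : pvBd label j m) (hmk : m ≤ k) (hkj : k ≤ j) :
    pvBd label k m := by
  unfold pvBd at *
  have key : (label.drop (k-m)).take m = (label.take k).drop (k-m) := by
    rw [List.drop_take]
    have : k - (k - m) = m := by omega
    rw [this]
  rw [key, ← h1, List.drop_take]
  have e2 : k - (k - m) = m := by omega
  rw [e2, List.drop_drop]
  have e3 : j - k + (k - m) = j - m := by omega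
  rw [e3, h2]

theorem pvBd_succ (label : List String) (j k : Nat)
    (hk : k ≤ j) (_hjL : j < label.length) (hc : label[j]? = label[k]?)
    (h : pvBd label j k) : pvBd label (j+1) (k+1) := by
  unfold pvBd at *
  have e1 : j + 1 - (k + 1) = j - k := by omega
  rw [e1, List.take_add_one, List.take_add_one, h, List.getElem?_drop]
  have e2 : j - k + k = j := by omega
  rw [e2, hc]

theorem pvBd_pred (label : List String) (j k : Nat) (hk : k ≤ j)
    (h : pvBd label (j+1) (k+1)) :
    pvBd label j k ∧ label[j]? = label[k]? := by
  unfold pvBd at *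
  have e1 : j + 1 - (k + 1) = j - k := by omega
  rw [e1] at h
  constructor
  · have := congrArg (fun l => l.take k) h
    simpa [List.take_take] using this
  · have := congrArg (fun l => l[k]?) h
    simp only [List.getElem?_take_of_lt (Nat.lt_succ_self k), List.getElem?_drop] at this
    have e2 : j - k + k = j := by omega
    rwa [e2] at this

-- the table is correct up to prefix length q
def pvGoodTbl (label : List String) (fail : List Nat) (q : Nat) : Prop :=
  fail.length = q ∧ ∀ j, 1 ≤ j → j ≤ q →
    (fail.getD (j-1) 0 < j ∧ pvBd label j (fail.getD (j-1) 0)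
     ∧ ∀ m, fail.getD (j-1) 0 < m → m < j → ¬ pvBd label j m)

theorem pvGetD_append_lt (l l' : List Nat) (i : Nat) (h : i < l.length) :
    (l ++ l').getD i 0 = l.getD i 0 := by
  rw [List.getD_eq_getElem _ _ (by simp; omega), List.getD_eq_getElem _ _ h,
    List.getElem_append_left h]

theorem pvGetD_append_self (l : List Nat) (x : Nat) :
    (l ++ [x]).getD l.length 0 = x := by
  rw [List.getD_eq_getElem _ _ (by simp)]
  simp

-- the while loop of _fall, run on the label itself during table construction:
-- it returns the largest border of label[:j] whose next character matches tj (or 0)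
theorem pvTblFall_spec (label : List String) (fail : List Nat) (q : Nat)
    (hg : pvGoodTbl label fail q) (j : Nat) (hjq : j ≤ q) (tj : String) :
    ∀ (f k : Nat), k ≤ f → k < j → pvBd label j k →
      (∀ m, pvBd label j m → m < j → tj = label.getD m "" → m ≤ k) →
      (pvFall label fail tj f k < j
       ∧ pvBd label j (pvFall label fail tj f k)
       ∧ (tj = label.getD (pvFall label fail tj f k) ""
          ∨ (pvFall label fail tj f k = 0 ∧ tj ≠ label.getD 0 ""))
       ∧ (∀ m, pvBd label j m → m < j → tj = label.getD m "" → m ≤ pvFall label fail tj f k)) := by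
  intro f
  induction f with
  | zero =>
    intro k hkf hkj hbd hdom
    have hk0 : k = 0 := by omega
    subst hk0
    refine ⟨hkj, hbd, ?_, hdom⟩
    by_cases h : tj = label.getD 0 ""
    · exact Or.inl h
    · exact Or.inr ⟨rfl, h⟩
  | succ f ih =>
    intro k hkf hkj hbd hdom
    simp only [pvFall]
    split_ifs with hcond
    · obtain ⟨hk0, hne⟩ := hcond
      set k2 := fail.getD (k-1) 0 with hk2
      obtain ⟨hk2lt, hbdk, hmaxk⟩ := hg.2 k (by omega) (by omega)
      have hbd2 : pvBd label j k2 := pvBd_trans label j k k2 hbd hbdk (by omega) (by omega)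
      have hdom2 : ∀ m, pvBd label j m → m < j → tj = label.getD m "" → m ≤ k2 := by
        intro m hbm hmj hcm
        have hmk : m ≤ k := hdom m hbm hmj hcm
        have hmne : m ≠ k := by
          intro h; apply hne; rw [← h]; exact hcm
        by_contra hgt
        exact hmaxk m (by omega) (by omega) (pvBd_restrict label j k m hbd hbm (by omega) (by omega))
      exact ih k2 (by omega) (by omega) hbd2 hdom2
    · refine ⟨hkj, hbd, ?_, hdom⟩
      rcases not_and_or.mp hcond with h | h
      · have hk0 : k = 0 := by omega
        subst hk0
        by_cases htk : tj = label.getD 0 ""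
        · exact Or.inl htk
        · exact Or.inr ⟨rfl, htk⟩
      · exact Or.inl (not_not.mp h)

-- one construction step extends a correct table by the maximal border of the next prefix
theorem pvBuild_good (label : List String) :
    ∀ (c j : Nat) (fail : List Nat), j + c = label.length → 1 ≤ j →
      pvGoodTbl label fail j →
      pvGoodTbl label (pvBuildGo label c j fail (fail.getD (j-1) 0)) label.length := by
  intro c
  induction c with
  | zero =>
    intro j fail hc _ hg
    have : j = label.length := by omega
    subst this
    exact hg
  | succ c ih =>
    intro j fail hc hj1 hg
    have hjL : j < label.length := by omega
    simp only [pvBuildGo]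
    set k := fail.getD (j-1) 0 with hk
    set tj := label.getD j "" with htj
    obtain ⟨hklt, hbdk, hmaxk⟩ := hg.2 j hj1 le_rfl
    have hdom : ∀ m, pvBd label j m → m < j → tj = label.getD m "" → m ≤ k := by
      intro m hbm hmj _
      by_contra hgt
      exact hmaxk m (by omega) hmj hbm
    obtain ⟨r1, r2, r3, r4⟩ :=
      pvTblFall_spec label fail j hg j le_rfl tj k k le_rfl hklt hbdk hdom
    set r := pvFall label fail tj k k with hr
    set k2 := if tj = label.getD r "" then r + 1 else r with hk2
    have hk2lt : k2 < j + 1 := by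
      rw [hk2]; split_ifs <;> omega
    have hbd2 : pvBd label (j+1) k2 := by
      rw [hk2]
      split_ifs with hch
      · apply pvBd_succ label j r (by omega) hjL ?_ r2
        rw [List.getElem?_eq_getElem hjL, List.getElem?_eq_getElem (by omega : r < label.length),
          ← List.getD_eq_getElem label "" hjL, ← List.getD_eq_getElem label "" (by omega : r < label.length),
          ← htj, hch]
      · rcases r3 with h | ⟨h0, _⟩
        · exact absurd h hch
        · rw [h0]; exact pvBd_zero label (j+1)
    have hmax2 : ∀ m, k2 < m → m < j + 1 → ¬ pvBd label (j+1) m := by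
      intro m hm1 hm2 hbm
      have hm0 : 1 ≤ m := by omega
      obtain ⟨mm, rfl⟩ : ∃ mm, m = mm + 1 := ⟨m - 1, by omega⟩
      obtain ⟨hb', hc'⟩ := pvBd_pred label j mm (by omega) hbm
      have hchm : tj = label.getD mm "" := by
        rw [htj, List.getD_eq_getElem label "" hjL,
          List.getD_eq_getElem label "" (by omega : mm < label.length)]
        have := hc'
        rw [List.getElem?_eq_getElem hjL, List.getElem?_eq_getElem (by omega : mm < label.length)] at this
        exact Option.some.inj this
      have hmr : mm ≤ r := r4 mm hb' (by omega) hchm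
      rw [hk2] at hm1
      split_ifs at hm1 with hch
      · omega
      · rcases r3 with h | ⟨h0, hne0⟩
        · exact hch h
        · have : mm = 0 := by omega
          subst this
          exact hne0 hchm
    have hg' : pvGoodTbl label (fail ++ [k2]) (j+1) := by
      refine ⟨by simp [hg.1], ?_⟩
      intro j' h1 h2
      rcases Nat.lt_or_ge j' (j+1) with hlt | hge
      · have hj'j : j' ≤ j := by omega
        have hidx : j' - 1 < fail.length := by rw [hg.1]; omega
        rw [pvGetD_append_lt fail [k2] (j'-1) hidx]
        exact hg.2 j' h1 hj'j
      · have : j' = j + 1 := by omega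
        subst this
        have hidx : j + 1 - 1 = fail.length := by simp [hg.1]
        rw [hidx, pvGetD_append_self]
        exact ⟨hk2lt, hbd2, hmax2⟩
    have hlast : k2 = (fail ++ [k2]).getD ((j+1)-1) 0 := by
      have hidx : j + 1 - 1 = fail.length := by simp [hg.1]
      rw [hidx, pvGetD_append_self]
    have := ih (j+1) (fail ++ [k2]) (by omega) (by omega) hg'
    rwa [← hlast] at this

theorem pvGood_full (label : List String) (hL : 1 ≤ label.length) :
    pvGoodTbl label (pvFailTbl label) label.length := by
  have hinit : pvGoodTbl label [0] 1 := by
    refine ⟨rfl, ?_⟩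
    intro j h1 h2
    have : j = 1 := by omega
    subst this
    exact ⟨by simp, pvBd_zero label 1, by intro m hm1 hm2; omega⟩
  have := pvBuild_good label (label.length - 1) 1 [0] (by omega) le_rfl hinit
  simpa [pvFailTbl] using this

-- ---- partial-match invariant ----
-- Pa j i: the j tokens ending at position i match the first j tokens of label
def pvPa (tokens label : List String) (j i : Nat) : Prop :=
  (tokens.drop (i - j)).take j = label.take j

theorem pvPa_zero (tokens label : List String) (i : Nat) : pvPa tokens label 0 i := by
  simp [pvPa]

-- extending a partial match by one equal token
theorem pvPa_succ (tokens label : List String) (j i : Nat)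
    (hp : pvPa tokens label j i) (hj : j ≤ i)
    (ht : tokens[i]? = label[j]?) :
    pvPa tokens label (j+1) (i+1) := by
  unfold pvPa at *
  have h1 : i + 1 - (j + 1) = i - j := by omega
  rw [h1, List.take_add_one, List.take_add_one, hp, List.getElem?_drop]
  have h2 : i - j + j = i := by omega
  rw [h2, ht]

-- a partial match transported along a border
theorem pvPa_of_bd (tokens label : List String) (j i k : Nat)
    (hp : pvPa tokens label j i) (hj : j ≤ i) (hk : k ≤ j)
    (hb : pvBd label j k) :
    pvPa tokens label k i := by
  unfold pvPa at *
  unfold pvBd at hb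
  have h1 : i - k = (i - j) + (j - k) := by omega
  rw [h1, ← List.drop_drop]
  have h2 : ((tokens.drop (i - j)).drop (j - k)).take k
      = ((tokens.drop (i - j)).take j).drop (j - k) := by
    rw [List.drop_take]
    have : j - (j - k) = k := by omega
    rw [this]
  rw [h2, hp, List.drop_take]
  have h3 : j - (j - k) = k := by omega
  rw [h3, hb]

-- a mismatch at offset j kills the candidate start i - j
theorem pvNoOcc_of_mismatch (tokens label : List String) (j i : Nat)
    (_hp : pvPa tokens label j i) (hj : j ≤ i) (hjL : j < label.length)
    (_hi : i < tokens.length) (hne : tokens[i]? ≠ label[j]?) :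
    (tokens.drop (i - j)).take label.length ≠ label := by
  intro hocc
  apply hne
  have := congrArg (fun l => l[j]?) hocc
  simp only [List.getElem?_take_of_lt hjL, List.getElem?_drop] at this
  have h2 : i - j + j = i := by omega
  rw [h2] at this
  rw [this, List.getElem?_eq_getElem hjL]

-- border maximality kills every candidate start strictly between i-j and i-k
theorem pvNoOcc_of_bd_max (tokens label : List String) (j i k t : Nat)
    (hp : pvPa tokens label j i) (hj : j ≤ i) (hjL : j ≤ label.length)
    (hmax : ∀ m, k < m → m < j → ¬ pvBd label j m)
    (ht1 : i - j < t) (ht2 : t < i - k) :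
    (tokens.drop t).take label.length ≠ label := by
  intro hocc
  have hm1 : i - t < j := by omega
  have hm2 : k < i - t := by omega
  set m := i - t with hm
  have hmL : m ≤ label.length := by omega
  apply hmax m hm2 hm1
  -- from the full match at t: (tokens.drop t).take m = label.take m
  have hpref : (tokens.drop t).take m = label.take m := by
    have := congrArg (fun l => l.take m) hocc
    simpa [List.take_take, Nat.min_eq_left hmL] using this
  -- and tokens.drop t is tokens.drop (i-j) shifted by j - m
  unfold pvBd
  have h1 : (label.drop (j - m)).take m = (label.take j).drop (j - m) := by
    rw [List.drop_take]
    have : j - (j - m) = m := by omega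
    rw [this]
  rw [h1, ← hp, List.drop_take]
  have h2 : j - (j - m) = m := by omega
  rw [h2, List.drop_drop]
  have h3 : i - j + (j - m) = t := by omega
  rw [h3, hpref]

-- ---- the while loop (pvFall) ----
theorem pvFall_spec (tokens label : List String) (hL : 1 ≤ label.length) (i : Nat)
    (hi : i < tokens.length) (tok : String) (htok : tokens[i]? = some tok) :
    ∀ (f j : Nat), j ≤ f → j < label.length → j ≤ i → pvPa tokens label j i →
      (pvFall label (pvFailTbl label) tok f j ≤ j
       ∧ pvFall label (pvFailTbl label) tok f j < label.length
       ∧ pvPa tokens label (pvFall label (pvFailTbl label) tok f j) i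
       ∧ (tok = label.getD (pvFall label (pvFailTbl label) tok f j) ""
          ∨ (pvFall label (pvFailTbl label) tok f j = 0 ∧ tok ≠ label.getD 0 ""))
       ∧ pvSel tokens label (tokens.length + 1) (i - j)
           = pvSel tokens label (tokens.length + 1) (i - pvFall label (pvFailTbl label) tok f j)) := by
  intro f
  induction f with
  | zero =>
    intro j hjf hjL hji hp
    have hj0 : j = 0 := by omega
    subst hj0
    refine ⟨le_rfl, hL, hp, ?_, rfl⟩
    by_cases h : tok = label.getD 0 ""
    · exact Or.inl h
    · exact Or.inr ⟨rfl, h⟩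
  | succ f ih =>
    intro j hjf hjL hji hp
    simp only [pvFall]
    split_ifs with hcond
    · -- fallback step
      obtain ⟨hj0, hne⟩ := hcond
      set k := (pvFailTbl label).getD (j-1) 0 with hkdef
      obtain ⟨hklt, hbd, hmax⟩ := (pvGood_full label hL).2 j (by omega) (by omega)
      have hpk : pvPa tokens label k i := pvPa_of_bd tokens label j i k hp hji (by omega) hbd
      have hne' : tokens[i]? ≠ label[j]? := by
        rw [htok, List.getElem?_eq_getElem hjL]
        intro h
        apply hne
        rw [List.getD_eq_getElem label "" hjL]
        exact Option.some.inj h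
      have hsel : pvSel tokens label (tokens.length + 1) (i - j)
          = pvSel tokens label (tokens.length + 1) (i - k) := by
        apply pvSel_congr tokens label hL ((i - k) - (i - j)) _ _ (by omega)
        intro t ht1 ht2
        rcases Nat.eq_or_lt_of_le ht1 with he | hlt
        · rw [← he]
          exact pvNoOcc_of_mismatch tokens label j i hp hji hjL hi hne'
        · exact pvNoOcc_of_bd_max tokens label j i k t hp hji (by omega) hmax hlt ht2
      obtain ⟨c1, c2, c3, c4, c5⟩ := ih k (by omega) (by omega) (by omega) hpk
      exact ⟨le_trans c1 (by omega), c2, c3, c4, hsel.trans c5⟩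
    · -- loop exits
      refine ⟨le_rfl, hjL, hp, ?_, rfl⟩
      rcases not_and_or.mp hcond with h | h
      · have hj0 : j = 0 := by omega
        subst hj0
        by_cases htk : tok = label.getD 0 ""
        · exact Or.inl htk
        · exact Or.inr ⟨rfl, htk⟩
      · exact Or.inl (not_not.mp h)

-- ---- the main scan: KMP (reset on match) = A's non-overlapping skip scan ----
theorem pvKmp_main (tokens label : List String) (hL : 1 ≤ label.length) :
    ∀ (l : List String) (i j : Nat) (acc : List Int),
      tokens.drop i = l → j ≤ i → j < label.length → pvPa tokens label j i →
      pvKmpGo label (pvFailTbl label) l i j acc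
        = acc ++ (pvSel tokens label (tokens.length + 1) (i - j)).map (fun s : Nat => (s : Int)) := by
  intro l
  induction l with
  | nil =>
    intro i j acc hdrop hji hjL hp
    have hni : tokens.length ≤ i := by
      by_contra h
      have := congrArg List.length hdrop
      simp at this
      omega
    rw [pvKmpGo, pvSel_nil tokens label _ _ hL (by omega)]
    simp
  | cons tok rest ih =>
    intro i j acc hdrop hji hjL hp
    have hi : i < tokens.length := by
      by_contra h
      rw [List.drop_eq_nil_of_le (by omega)] at hdrop
      simp at hdrop
    have htok : tokens[i]? = some tok := by
      have h : (List.drop i tokens)[0]? = some tok := by rw [hdrop]; rfl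
      rw [List.getElem?_drop] at h
      simpa using h
    have hrest : tokens.drop (i+1) = rest := by
      have h : (List.drop i tokens).tail = rest := by rw [hdrop]; rfl
      rwa [List.tail_drop] at h
    simp only [pvKmpGo]
    obtain ⟨c1, c2, c3, c4, c5⟩ :=
      pvFall_spec tokens label hL i hi tok htok j j le_rfl hjL hji hp
    set j1 := pvFall label (pvFailTbl label) tok j j with hj1
    rcases c4 with hmatch | ⟨hz, hnm⟩
    · -- tok = label[j1]
      rw [if_pos hmatch]
      have hgeq : tokens[i]? = label[j1]? := by
        rw [htok, List.getElem?_eq_getElem c2, ← List.getD_eq_getElem label "" c2, hmatch]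
      have hp' : pvPa tokens label (j1+1) (i+1) := pvPa_succ tokens label j1 i c3 (by omega) hgeq
      by_cases hfull : j1 + 1 = label.length
      · rw [if_pos hfull]
        -- full occurrence at i - j1
        have hocc : (tokens.drop (i - j1)).take label.length = label := by
          have := hp'
          unfold pvPa at this
          have he : i + 1 - (j1 + 1) = i - j1 := by omega
          rw [he, hfull] at this
          simpa using this
        have hsel1 : pvSel tokens label (tokens.length + 1) (i - j1)
            = (i - j1) :: pvSel tokens label (tokens.length + 1) (i + 1) := by
          rw [pvSel_cons tokens label tokens.length (i - j1) (by omega) hocc]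
          have he : i - j1 + label.length = i + 1 := by omega
          rw [he, pvSel_fuel tokens label hL tokens.length (i+1) (tokens.length + 1)
            (by omega) (by omega)]
        rw [ih (i+1) 0 (acc ++ [(i : Int) + 1 - (label.length : Int)]) hrest (by omega) (by omega)
          (pvPa_zero tokens label (i+1))]
        rw [c5, hsel1]
        have hcast : (i : Int) + 1 - (label.length : Int) = ((i - j1 : Nat) : Int) := by omega
        simp [hcast]
      · rw [if_neg hfull]
        rw [ih (i+1) (j1+1) acc hrest (by omega) (by omega) hp']
        rw [c5]
        have he : i + 1 - (j1 + 1) = i - j1 := by omega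
        rw [he]
    · -- j1 = 0 and tok ≠ label[0]: no match starting at i
      have hj2 : ¬ tok = label.getD j1 "" := by rw [hz]; exact hnm
      rw [if_neg hj2, hz, if_neg (show ¬ (0:Nat) = label.length by omega)]
      have hne' : tokens[i]? ≠ label[0]? := by
        rw [htok, List.getElem?_eq_getElem (by omega : 0 < label.length)]
        intro h
        apply hnm
        rw [List.getD_eq_getElem label "" (by omega)]
        exact Option.some.inj h
      have hsel : pvSel tokens label (tokens.length + 1) (i - j1)
          = pvSel tokens label (tokens.length + 1) (i + 1) := by
        rw [hz]
        apply pvSel_congr tokens label hL 1 _ _ (by omega)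
        intro t ht1 ht2
        have ht : t = i := by omega
        rw [ht]
        have := pvNoOcc_of_mismatch tokens label 0 i (pvPa_zero tokens label i) (by omega) hL hi hne'
        simpa using this
      rw [ih (i+1) 0 acc hrest (by omega) (by omega) (pvPa_zero tokens label (i+1))]
      rw [c5, hsel]
      norm_num

theorem pvStarts_eq (tokens label : List String) (hL : 1 ≤ label.length) :
    pvKmpGo label (pvFailTbl label) tokens 0 0 []
      = (pvSel tokens label (tokens.length + 1) 0).map (fun s : Nat => (s : Int)) := by
  have := pvKmp_main tokens label hL tokens 0 0 [] (by simp) le_rfl hL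
    (pvPa_zero tokens label 0)
  simpa using this

-- ---- window arithmetic ----
theorem pvMid_even (k L n s1 s2 : Int) :
    pvMiddleA k (PySem.Int.floordiv (s1 + s2) 2)
        (PySem.Int.floordiv ((s1 + L) + (s2 + L)) 2) n
      = (if PySem.Int.floordiv (s1 + s2) 2 + PySem.Int.floordiv L 2 - PySem.Int.floordiv k 2 < 0
           then ((0 : Int), k)
         else if PySem.Int.floordiv (s1 + s2) 2 + PySem.Int.floordiv L 2 + PySem.Int.floordiv k 2 > n
           then (n - k, n)
         else (PySem.Int.floordiv (s1 + s2) 2 + PySem.Int.floordiv L 2 - PySem.Int.floordiv k 2,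
               PySem.Int.floordiv (s1 + s2) 2 + PySem.Int.floordiv L 2 + PySem.Int.floordiv k 2)) := by
  have h2 : (0 : Int) < 2 := by norm_num
  simp only [pvMiddleA, PySem.Int.floordiv_eq_ediv_of_pos h2]
  have hc : ((s1 + s2) / 2 + ((s1 + L) + (s2 + L)) / 2) / 2 = (s1 + s2) / 2 + L / 2 := by omega
  rw [hc]

theorem pvMid_odd (k L n s : Int) :
    pvMiddleA k s (s + L) n
      = (if s + PySem.Int.floordiv L 2 - PySem.Int.floordiv k 2 < 0
           then ((0 : Int), k)
         else if s + PySem.Int.floordiv L 2 + PySem.Int.floordiv k 2 > n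
           then (n - k, n)
         else (s + PySem.Int.floordiv L 2 - PySem.Int.floordiv k 2,
               s + PySem.Int.floordiv L 2 + PySem.Int.floordiv k 2)) := by
  have h2 : (0 : Int) < 2 := by norm_num
  simp only [pvMiddleA, PySem.Int.floordiv_eq_ediv_of_pos h2]
  have hc : (s + (s + L)) / 2 = s + L / 2 := by omega
  rw [hc]

-- ===== VERDICT (by name: the statement is the Claim_ definition above) =====
theorem get_closest_180_spec : Claim_equal_get_closest_180 := by
  intro tokens label k _ hpre
  unfold Spec_get_closest_180 get_closest_180 get_closest_180_alt
  by_cases hle : (tokens.length : Int) ≤ k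
  · simp only [if_pos hle]
  · have hlab : label ≠ [] := hpre.resolve_left hle
    have hL : 1 ≤ label.length := by
      cases label with
      | nil => exact absurd rfl hlab
      | cons h t => simp
    simp only [if_neg hle, pvScanA_eq_map, pvStarts_eq tokens label hL, List.length_map]
    set S := pvSel tokens label (tokens.length + 1) 0 with hS
    have hget : ∀ j, j < S.length →
        (S.map (fun s : Nat => ((s : Int), (s : Int) + (label.length : Int)))).getD j (0, 0)
          = (((S.getD j 0 : Nat) : Int), ((S.getD j 0 : Nat) : Int) + (label.length : Int)) := by
      intro j hj
      rw [List.getD_eq_getElem _ _ (by simpa using hj), List.getElem_map,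
        List.getD_eq_getElem _ _ hj]
    have hgets : ∀ j, j < S.length →
        (S.map (fun s : Nat => (s : Int))).getD j 0 = ((S.getD j 0 : Nat) : Int) := by
      intro j hj
      rw [List.getD_eq_getElem _ _ (by simpa using hj), List.getElem_map,
        List.getD_eq_getElem _ _ hj]
    by_cases hm : S.length = 0
    · simp [hm]
    · have hlt1 : (S.length - 1) / 2 < S.length :=
        lt_of_le_of_lt (Nat.div_le_self _ _) (by omega)
      have hlt2 : S.length / 2 < S.length := Nat.div_lt_self (by omega) (by omega)
      by_cases hpar : S.length % 2 = 0
      · rw [if_pos ⟨hm, hpar⟩, if_neg hm, if_neg (by omega : ¬ S.length % 2 = 1),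
          hget _ hlt1, hget _ hlt2, hgets _ hlt1, hgets _ hlt2, pvMid_even]
      · rw [if_neg (fun h => hpar h.2), if_pos hm, if_neg hm,
          if_pos (by omega : S.length % 2 = 1), hget _ hlt2, hgets _ hlt2, pvMid_odd]
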